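-- pv_equiv track=rewrite | github.com/0xrocky/advent-of-code | day3/day3_a.py | return_priority
-- ===== SOURCE A (Python) =====
-- ord_A = ord('A')
--
-- ord_Z = ord('Z')
--
-- ord_a = ord('a')
--
-- ord_z = ord('z')
--
-- def return_priority(ch):
-- 	if ch.isupper():
-- 		for i in range(ord_A, ord_Z + 1):
-- 			if chr(i) == ch:
-- 				return (i - ord_A + 27)
-- 	else:
-- 		for i in range(ord_a, ord_z + 1):
-- 			if chr(i) == ch:
-- 				return (i - ord_a + 1)
-- ===== SOURCE B (Python) =====
-- ord_A = ord('A')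
--
-- ord_Z = ord('Z')
--
-- ord_a = ord('a')
--
-- ord_z = ord('z')
--
-- def return_priority(ch):
-- 	if len(ch) == 1:
-- 		if 'A' <= ch <= 'Z':
-- 			return ord(ch) - ord_A + 27
-- 		if 'a' <= ch <= 'z':
-- 			return ord(ch) - ord_a + 1
-- 	return None
-- ===== Notes on version B (the rewrite author's own statement) =====
-- stated objective: idiomatic
-- what changed: Replaces the isupper() test plus two 26-step linear scans comparing chr(i) with ch by a single length-1 check and direct ordinal arithmetic on ord(ch).
import Mathlib
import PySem

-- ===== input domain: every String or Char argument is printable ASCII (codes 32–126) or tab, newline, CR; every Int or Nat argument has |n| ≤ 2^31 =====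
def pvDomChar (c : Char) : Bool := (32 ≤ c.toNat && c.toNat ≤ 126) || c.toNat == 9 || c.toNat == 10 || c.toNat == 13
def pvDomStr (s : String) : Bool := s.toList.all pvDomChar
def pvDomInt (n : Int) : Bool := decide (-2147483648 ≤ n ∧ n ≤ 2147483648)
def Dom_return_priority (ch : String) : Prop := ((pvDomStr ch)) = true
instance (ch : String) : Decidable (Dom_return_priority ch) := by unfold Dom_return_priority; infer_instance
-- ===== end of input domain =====

-- B replaces A's isupper() test plus two 26-step chr(i)==ch scans by a length-1 check
-- and direct ordinal arithmetic; same return value everywhere.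

-- ===== PORT A =====
-- str.isupper(): at least one cased char and no lowercase cased char; exact on ASCII, where cased = letters
def pyStrIsupper (cs : List Char) : Bool :=
  cs.any PySem.Chars.isupper && cs.all (fun c => !PySem.Chars.islower c)

-- 'for i in range(..): if chr(i) == ch: return (i - base + off)' — first match wins
def pvScanA (ch : String) (base off : Int) (is : List Int) : Option Int :=
  match is with
  | [] => none
  | i :: rest =>
      if String.ofList [Char.ofNat i.toNat] == ch then some (i - base + off)
      else pvScanA ch base off rest

def return_priority (ch : String) : Option Int :=
  if pyStrIsupper ch.toList then
    pvScanA ch 65 27 (PySem.List.pyRange 65 (90 + 1) 1)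
  else
    pvScanA ch 97 1 (PySem.List.pyRange 97 (122 + 1) 1)

-- ===== PORT B =====
def return_priority_alt (ch : String) : Option Int :=
  match ch.toList with
  | [c] =>
      if 'A' ≤ c ∧ c ≤ 'Z' then some ((c.toNat : Int) - 65 + 27)
      else if 'a' ≤ c ∧ c ≤ 'z' then some ((c.toNat : Int) - 97 + 1)
      else none
  | _ => none

-- ===== PRECONDITION & SPEC =====
def Spec_return_priority (ch : String) (out : Option Int) : Prop := out = return_priority_alt ch
instance (ch : String) (out : Option Int) : Decidable (Spec_return_priority ch out) := by unfold Spec_return_priority; infer_instance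

-- ===== CLAIM (what is proved, stated in full; the proofs are below) =====
def Claim_equal_return_priority : Prop := ∀ (ch : String), Dom_return_priority ch → Spec_return_priority ch (return_priority ch)

-- ===== LEMMAS AND PROOFS =====

-- a scan can only match a single-character string
theorem pvScanA_of_not_single (ch : String) (base off : Int) (is : List Int)
    (h : ch.toList.length ≠ 1) : pvScanA ch base off is = none := by
  induction is with
  | nil => rfl
  | cons i rest ih =>
      rw [pvScanA]
      rw [if_neg, ih]
      intro hb
      have : (String.ofList [Char.ofNat i.toNat]).toList = ch.toList := by
        rw [eq_of_beq hb]
      simp at this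
      exact h (by rw [← this]; rfl)

-- on a single-character string the scan is a membership test on the code point
theorem pvScanA_single (c : Char) (base off : Int) (is : List Int)
    (hv : ∀ i ∈ is, 0 ≤ i ∧ i < 55296) :
    pvScanA (String.ofList [c]) base off is =
      if (c.toNat : Int) ∈ is then some ((c.toNat : Int) - base + off) else none := by
  induction is with
  | nil => rfl
  | cons i rest ih =>
      have hvi := hv i (List.mem_cons_self ..)
      have hval : (i.toNat).isValidChar := by
        unfold Nat.isValidChar
        omega
      have hcond : (String.ofList [Char.ofNat i.toNat] == String.ofList [c]) = true ↔
          i = (c.toNat : Int) := by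
        constructor
        · intro hb
          have h1 : Char.ofNat i.toNat = c := by
            have := eq_of_beq hb
            simpa [String.ofList_inj] using this
          have h2 : (Char.ofNat i.toNat).toNat = c.toNat := by rw [h1]
          rw [Char.toNat_ofNat, if_pos hval] at h2
          omega
        · intro hb
          have : i.toNat = c.toNat := by omega
          rw [this, Char.ofNat_toNat]
          exact beq_self_eq_true _
      rw [pvScanA]
      by_cases hm : i = (c.toNat : Int)
      · rw [if_pos (hcond.mpr hm), if_pos (by simp [← hm])]
        rw [hm]
      · rw [if_neg (fun hb => hm (hcond.mp hb)),
            ih (fun j hj => hv j (List.mem_cons_of_mem _ hj))]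
        have : ((c.toNat : Int) ∈ i :: rest) ↔ ((c.toNat : Int) ∈ rest) := by
          simp [List.mem_cons]
          intro h; exact absurd h.symm hm
        simp only [this]

theorem pyStrIsupper_single (c : Char) :
    pyStrIsupper [c] = (PySem.Chars.isupper c && !PySem.Chars.islower c) := by
  simp [pyStrIsupper]

theorem alt_single (c : Char) :
    return_priority_alt (String.ofList [c]) =
      if 'A' ≤ c ∧ c ≤ 'Z' then some ((c.toNat : Int) - 65 + 27)
      else if 'a' ≤ c ∧ c ≤ 'z' then some ((c.toNat : Int) - 97 + 1)
      else none := by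
  unfold return_priority_alt
  simp

theorem alt_not_single (ch : String) (h : ch.toList.length ≠ 1) :
    return_priority_alt ch = none := by
  unfold return_priority_alt
  match hl : ch.toList with
  | [] => rfl
  | [c] => rw [hl] at h; simp at h
  | c :: d :: rest => rfl

-- ===== VERDICT (by name: the statement is the Claim_ definition above) =====
theorem return_priority_spec : Claim_equal_return_priority := by
  intro ch _
  unfold Spec_return_priority return_priority
  have hup : ∀ i ∈ PySem.List.pyRange 65 (90 + 1) 1, 0 ≤ i ∧ i < 55296 := by
    intro i hi
    rw [PySem.List.mem_pyRange_one] at hi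
    omega
  have hlo : ∀ i ∈ PySem.List.pyRange 97 (122 + 1) 1, 0 ≤ i ∧ i < 55296 := by
    intro i hi
    rw [PySem.List.mem_pyRange_one] at hi
    omega
  match hl : ch.toList with
  | [] =>
      have hch : ch = String.ofList [] := by rw [← hl]; simp
      subst hch
      rw [alt_not_single _ (by simp)]
      rfl
  | [c] =>
      have hch : ch = String.ofList [c] := by rw [← hl]; simp
      subst hch
      rw [pyStrIsupper_single, alt_single,
          pvScanA_single c 65 27 _ hup, pvScanA_single c 97 1 _ hlo]
      have hmemU : ((c.toNat : Int) ∈ PySem.List.pyRange 65 (90 + 1) 1) ↔ (65 ≤ c.toNat ∧ c.toNat ≤ 90) := by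
        rw [PySem.List.mem_pyRange_one]; omega
      have hmemL : ((c.toNat : Int) ∈ PySem.List.pyRange 97 (122 + 1) 1) ↔ (97 ≤ c.toNat ∧ c.toNat ≤ 122) := by
        rw [PySem.List.mem_pyRange_one]; omega
      have hUc : PySem.Chars.isupper c = ('A' ≤ c && c ≤ 'Z') := by
        simp [PySem.Chars.isupper]
      have hLc : PySem.Chars.islower c = ('a' ≤ c && c ≤ 'z') := by
        simp [PySem.Chars.islower]
      have hA : ('A' ≤ c) ↔ 65 ≤ c.toNat := Iff.rfl
      have hZ : (c ≤ 'Z') ↔ c.toNat ≤ 90 := Iff.rfl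
      have ha : ('a' ≤ c) ↔ 97 ≤ c.toNat := Iff.rfl
      have hz : (c ≤ 'z') ↔ c.toNat ≤ 122 := Iff.rfl
      by_cases h1 : 65 ≤ c.toNat ∧ c.toNat ≤ 90
      · have hu : (PySem.Chars.isupper c && !PySem.Chars.islower c) = true := by
          rw [hUc, hLc]
          simp [hA, hZ, ha, hz]
          omega
        rw [if_pos hu, if_pos (hmemU.mpr h1), if_pos ⟨hA.mpr h1.1, hZ.mpr h1.2⟩]
      · have hu : (PySem.Chars.isupper c && !PySem.Chars.islower c) = false := by
          rw [hUc, hLc]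
          simp [hA, hZ, ha, hz]
          omega
        rw [if_neg (by simp [hu])]
        by_cases h2 : 97 ≤ c.toNat ∧ c.toNat ≤ 122
        · rw [if_pos (hmemL.mpr h2),
              if_neg (fun (h : 'A' ≤ c ∧ c ≤ 'Z') => h1 ⟨hA.mp h.1, hZ.mp h.2⟩),
              if_pos ⟨ha.mpr h2.1, hz.mpr h2.2⟩]
        · rw [if_neg (fun h => h2 (hmemL.mp h)),
              if_neg (fun (h : 'A' ≤ c ∧ c ≤ 'Z') => h1 ⟨hA.mp h.1, hZ.mp h.2⟩),
              if_neg (fun (h : 'a' ≤ c ∧ c ≤ 'z') => h2 ⟨ha.mp h.1, hz.mp h.2⟩)]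
  | c :: d :: rest =>
      have hlen : ch.toList.length ≠ 1 := by rw [hl]; simp
      rw [alt_not_single _ hlen]
      split_ifs <;> rw [pvScanA_of_not_single _ _ _ _ hlen]
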